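-- pv_equiv track=rewrite | github.com/jeremy-rifkin/cpp-dependency-analyzer | main.py | phase_one
-- ===== SOURCE A (Python) =====
-- Trigraph_translation_table = {
--     "=": "#",
--     "/": "\\",
--     "'": "^",
--     "(": "[",
--     ")": "]",
--     "!": "|",
--     "<": "{",
--     ">": "}",
--     "-": "~"
-- }
--
-- def phase_one(string):
--     # trigraphs
--     i = 0
--     translated_string = ""
--     while i < len(string):
--         if string[i] == "?" and i < len(string) - 2 and string[i + 1] == "?" and string[i + 2] in Trigraph_translation_table:
--             translated_string += Trigraph_translation_table[string[i + 2]]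
--             i += 3
--         else:
--             translated_string += string[i]
--             i += 1
--     return translated_string
-- ===== SOURCE B (Python) =====
-- import re
--
-- Trigraph_translation_table = {
--     "=": "#",
--     "/": "\\",
--     "'": "^",
--     "(": "[",
--     ")": "]",
--     "!": "|",
--     "<": "{",
--     ">": "}",
--     "-": "~"
-- }
--
-- _TRIGRAPH_RE = re.compile(r"\?\?([=/'()!<>-])")
--
-- def phase_one(string):
--     # trigraphs: let the regex engine do the left-to-right non-overlapping scan
--     return _TRIGRAPH_RE.sub(lambda m: Trigraph_translation_table[m.group(1)], string)
-- ===== Notes on version B (the rewrite author's own statement) =====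
-- stated objective: idiomatic
-- what changed: Replaces the hand-rolled while-loop with explicit index arithmetic and quadratic string += concatenation by a single compiled re.sub over the fixed trigraph pattern with a table-lookup replacement function.
import Mathlib
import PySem

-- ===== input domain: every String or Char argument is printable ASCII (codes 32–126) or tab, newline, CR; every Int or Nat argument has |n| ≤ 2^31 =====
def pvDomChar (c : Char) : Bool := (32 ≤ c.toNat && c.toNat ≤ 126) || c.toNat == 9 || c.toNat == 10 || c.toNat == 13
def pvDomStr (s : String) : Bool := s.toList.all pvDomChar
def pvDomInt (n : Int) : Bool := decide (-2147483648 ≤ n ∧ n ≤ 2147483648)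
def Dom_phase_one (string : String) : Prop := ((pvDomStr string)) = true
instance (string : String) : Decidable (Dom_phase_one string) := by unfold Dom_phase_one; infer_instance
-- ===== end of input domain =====

-- B replaces A's hand-rolled index loop by a single regex substitution (re.sub of the
-- fixed trigraph pattern with a lookup replacement); same return value, idiomatic rewrite.

-- the module constant Trigraph_translation_table (single-char keys/values)
def trigraphTable : PySem.Dict Char Char :=
  PySem.Dict.mk [('=', '#'), ('/', '\\'), ('\'', '^'), ('(', '['), (')', ']'),
                 ('!', '|'), ('<', '{'), ('>', '}'), ('-', '~')]

-- ===== PORT A =====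
-- the while loop over index i with accumulator translated_string.
-- 'i < len(string) - 2' over Python ints equals 'i + 2 < len' here since i, len ≥ 0.
def phaseOneLoop (s : List Char) (i : Nat) (acc : List Char) : List Char :=
  if _h : i < s.length then
    if s.getD i ' ' = '?' ∧ i + 2 < s.length ∧ s.getD (i + 1) ' ' = '?' ∧
        (trigraphTable.get? (s.getD (i + 2) ' ')).isSome then
      phaseOneLoop s (i + 3) (acc ++ [(trigraphTable.get? (s.getD (i + 2) ' ')).getD ' '])
    else
      phaseOneLoop s (i + 1) (acc ++ [s.getD i ' '])
  else acc
termination_by s.length - i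

def phase_one (string : String) : String :=
  String.ofList (phaseOneLoop string.toList 0 [])

-- ===== PORT B =====
-- re.sub(r"\?\?([=/'()!<>-])", repl, string): the regex engine's left-to-right
-- non-overlapping scan — match consumes 3 chars, a non-match emits 1 char and moves on.
def subTrigraph : List Char → List Char
  | '?' :: '?' :: c :: rest =>
      match trigraphTable.get? c with
      | some t => t :: subTrigraph rest
      | none => '?' :: subTrigraph ('?' :: c :: rest)
  | c :: rest => c :: subTrigraph rest
  | [] => []
termination_by l => l.length

def phase_one_alt (string : String) : String :=
  String.ofList (subTrigraph string.toList)

-- ===== PRECONDITION & SPEC =====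
def Spec_phase_one (string : String) (out : String) : Prop := out = phase_one_alt string
instance (string : String) (out : String) : Decidable (Spec_phase_one string out) := by unfold Spec_phase_one; infer_instance

-- ===== CLAIM (what is proved, stated in full; the proofs are below) =====
def Claim_equal_phase_one : Prop := ∀ (string : String), Dom_phase_one string → Spec_phase_one string (phase_one string)

-- ===== LEMMAS AND PROOFS =====

-- a non-matching head passes through unchanged
lemma subTrigraph_cons_of_not (c : Char) (l : List Char)
    (h : ¬ (c = '?' ∧ ∃ d rest, l = '?' :: d :: rest ∧ (trigraphTable.get? d).isSome)) :
    subTrigraph (c :: l) = c :: subTrigraph l := by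
  rw [subTrigraph.eq_def]
  split
  · rename_i d rest heq
    injection heq with h1 h2
    subst h1 h2
    split
    · rename_i t ht
      exact absurd ⟨rfl, d, rest, rfl, by simp [ht]⟩ h
    · rfl
  · rename_i c' rest heq
    injection heq with h1 h2
    subst h1 h2
    rfl
  · rename_i heq; exact absurd heq (by simp)

-- loop invariant: A's while loop from index i is B's scan of the remaining suffix
lemma phaseOneLoop_eq (s : List Char) (i : Nat) (acc : List Char) :
    phaseOneLoop s i acc = acc ++ subTrigraph (s.drop i) := by
  induction i, acc using phaseOneLoop.induct s with
  | case1 i acc hlt hc ih =>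
    rw [phaseOneLoop, dif_pos hlt, if_pos hc, ih]
    obtain ⟨h0, h2, h1, hsome⟩ := hc
    rw [List.getD_eq_getElem s ' ' hlt] at h0
    rw [List.getD_eq_getElem s ' ' (show i + 1 < s.length by omega)] at h1
    rw [List.getD_eq_getElem s ' ' (show i + 2 < s.length by omega)] at hsome ⊢
    obtain ⟨t, ht⟩ := Option.isSome_iff_exists.mp hsome
    rw [List.drop_eq_getElem_cons hlt,
        List.drop_eq_getElem_cons (show i + 1 < s.length by omega),
        List.drop_eq_getElem_cons (show i + 1 + 1 < s.length by omega)]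
    simp only [show i + 1 + 1 = i + 2 by omega, show i + 2 + 1 = i + 3 by omega]
    rw [h0, h1, subTrigraph, ht]
    simp
  | case2 i acc hlt hc ih =>
    rw [phaseOneLoop, dif_pos hlt, if_neg hc, ih, List.drop_eq_getElem_cons hlt]
    rw [subTrigraph_cons_of_not _ _ ?hn]
    · simp [hlt]
    case hn =>
      rintro ⟨h0, d, rest, hdr, hsome⟩
      apply hc
      have hlen := congrArg List.length hdr
      simp at hlen
      have d1 := List.drop_eq_getElem_cons (show i + 1 < s.length by omega) (l := s)
      rw [hdr] at d1
      injection d1 with e1 d2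
      have d3 := List.drop_eq_getElem_cons (show i + 1 + 1 < s.length by omega) (l := s)
      rw [← d2] at d3
      injection d3 with e2 _
      refine ⟨?_, by omega, ?_, ?_⟩
      · rw [List.getD_eq_getElem s ' ' hlt]; exact h0
      · rw [List.getD_eq_getElem s ' ' (show i + 1 < s.length by omega)]
        exact e1.symm
      · rw [List.getD_eq_getElem s ' ' (show i + 2 < s.length by omega)]
        simp only [show i + 1 + 1 = i + 2 by omega] at e2
        rw [← e2]; exact hsome
  | case3 i acc hge =>
    rw [phaseOneLoop, dif_neg hge, List.drop_eq_nil_of_le (by omega), subTrigraph]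
    simp

-- ===== VERDICT (by name: the statement is the Claim_ definition above) =====
theorem phase_one_spec : Claim_equal_phase_one := by
  intro string _
  unfold Spec_phase_one phase_one phase_one_alt
  rw [phaseOneLoop_eq]
  simp
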